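-- pv_equiv track=rewrite | github.com/zeroDtree/my_pkg_py | src/ls_mlkit/util/offload/utils.py | get_partition_block
-- ===== SOURCE A (Python) =====
-- def uniformly_split(lst: list, n: int) -> list[list]:
--     """Split a list into n roughly equal chunks using pure Python."""
--     k, rem = divmod(len(lst), n)
--     chunks = []
--     start = 0
--     for i in range(n):
--         end = start + k + (1 if i < rem else 0)
--         chunks.append(lst[start:end])
--         start = end
--     return chunks
--
-- def get_partition_block(module_list: list, num_block: int) -> dict:
--     """Partition module_list into num_block groups and return per-module metadata."""
--     num_block = min(num_block, len(module_list))
--     module_groups = uniformly_split(module_list, num_block)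
--     module_info: dict = {}
--     for i, group in enumerate(module_groups):
--         first_block = i == 0
--         last_block = i == (num_block - 1)
--         n_module = len(group)
--         for j, module_name in enumerate(group):
--             module_info[module_name] = {
--                 "first_block_flag": first_block,
--                 "last_block_flag": last_block,
--                 "first_module_flag": j == 0,
--                 "last_module_flag": j == (n_module - 1),
--             }
--     return module_info
-- ===== SOURCE B (Python) =====
-- def get_partition_block(module_list: list, num_block: int) -> dict:
--     """Partition module_list into num_block groups and return per-module metadata.
--
--     Single walk over module_list: block sizes are computed up front in closed
--     form, and a block counter plus within-block position are advanced as the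
--     walk crosses block boundaries, so no chunk lists are materialised.
--     """
--     n = min(num_block, len(module_list))
--     k, rem = divmod(len(module_list), n)
--     sizes = [k + (1 if i < rem else 0) for i in range(n)]
--     info: dict = {}
--     block = 0
--     pos = 0
--     for name in module_list:
--         if pos == sizes[block]:
--             block += 1
--             pos = 0
--         size = sizes[block]
--         info[name] = {
--             "first_block_flag": block == 0,
--             "last_block_flag": block == n - 1,
--             "first_module_flag": pos == 0,
--             "last_module_flag": pos == size - 1,
--         }
--         pos += 1
--     return info
-- ===== Notes on version B (the rewrite author's own statement) =====
-- stated objective: alternative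
-- what changed: B replaces A's build-the-chunks-then-double-loop structure with a single walk over the module list that advances a block counter and within-block position across closed-form block sizes, never materialising chunk lists; Pre_ excludes num_block <= 0 and the empty list, where A either raises ZeroDivisionError or returns an accidental empty dict for a nonsensical negative block count (B raises IndexError there).
-- outside the precondition, e.g. on get_partition_block(['a'], -1): A returns {}, B raises IndexError
import Mathlib
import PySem

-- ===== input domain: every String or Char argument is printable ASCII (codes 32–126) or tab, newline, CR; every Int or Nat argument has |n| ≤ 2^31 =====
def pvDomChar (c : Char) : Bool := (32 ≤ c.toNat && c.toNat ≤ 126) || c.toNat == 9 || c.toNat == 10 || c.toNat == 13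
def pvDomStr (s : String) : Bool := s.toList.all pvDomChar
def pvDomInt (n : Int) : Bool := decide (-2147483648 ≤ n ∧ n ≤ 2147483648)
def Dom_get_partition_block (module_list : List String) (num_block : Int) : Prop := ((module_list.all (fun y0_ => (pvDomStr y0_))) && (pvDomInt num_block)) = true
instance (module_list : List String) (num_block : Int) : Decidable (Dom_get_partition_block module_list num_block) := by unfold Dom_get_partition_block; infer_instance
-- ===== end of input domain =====

-- B does the same job as A in one walk over the module list with closed-form block sizes instead of building chunk lists (objective: alternative decomposition; equivalence of the RETURN value is proved on Pre_).

-- ===== PORT A =====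
def uniformly_split (lst : List String) (n : Int) : List (List String) :=
  match PySem.Int.divmod? (lst.length : Int) n with
  | none => []   -- ZeroDivisionError (n = 0), excluded by Pre_
  | some (k, rem) =>
    ((PySem.List.pyRange 0 n 1).foldl
      (fun (st : List (List String) × Int) i =>
        (st.1 ++ [PySem.List.slice lst (some st.2) (some (st.2 + k + if i < rem then 1 else 0))],
         st.2 + k + if i < rem then 1 else 0))
      ([], 0)).1

def get_partition_block (module_list : List String) (num_block : Int) : List (String × List (String × Bool)) :=
  let num_block := min num_block (module_list.length : Int)
  let module_groups := uniformly_split module_list num_block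
  ((PySem.List.enumerate module_groups).foldl
    (fun (d : PySem.Dict String (List (String × Bool))) ig =>
      let first_block := ig.1 == 0
      let last_block := ig.1 == num_block - 1
      let n_module := ((ig.2).length : Int)
      (PySem.List.enumerate ig.2).foldl
        (fun d jm =>
          d.insert jm.2 [("first_block_flag", first_block),
                         ("last_block_flag", last_block),
                         ("first_module_flag", jm.1 == 0),
                         ("last_module_flag", jm.1 == n_module - 1)])
        d)
    PySem.Dict.empty).items

-- ===== PORT B =====
-- one step of B's walk: advance the block counter when the within-block position
-- reaches the current block's size, then record the module's flags.
-- (pyGet? = none is Python's IndexError on sizes[block]; that happens only outside Pre_,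
-- where Python B raises, so the getD default is never observed on admitted inputs.)
def pvStepB (n : Int) (sizes : List Int)
    (st : Int × Int × PySem.Dict String (List (String × Bool))) (name : String) :
    Int × Int × PySem.Dict String (List (String × Bool)) :=
  let adv := st.2.1 == (PySem.List.pyGet? sizes st.1).getD 0
  let block := if adv then st.1 + 1 else st.1
  let pos : Int := if adv then 0 else st.2.1
  let size := (PySem.List.pyGet? sizes block).getD 0
  (block, pos + 1,
    st.2.2.insert name [("first_block_flag", block == 0),
                        ("last_block_flag", block == n - 1),
                        ("first_module_flag", pos == 0),
                        ("last_module_flag", pos == size - 1)])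

def get_partition_block_alt (module_list : List String) (num_block : Int) : List (String × List (String × Bool)) :=
  let n := min num_block (module_list.length : Int)
  match PySem.Int.divmod? (module_list.length : Int) n with
  | none => []   -- ZeroDivisionError (n = 0), excluded by Pre_
  | some (k, rem) =>
    let sizes := (PySem.List.pyRange 0 n 1).map (fun i => k + if i < rem then 1 else 0)
    ((module_list.foldl (pvStepB n sizes) ((0 : Int), (0 : Int), PySem.Dict.empty)).2.2).items

-- ===== PRECONDITION & SPEC =====
-- Pre_ excludes num_block ≤ 0 and the empty list: there min(num_block, len) ≤ 0, so A either
-- raises ZeroDivisionError (min = 0) or, for a nonsensical negative block count, falls through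
-- an empty range() and returns an accidental empty dict that no partitioning semantics
-- specifies (B raises IndexError there).
def Pre_get_partition_block (module_list : List String) (num_block : Int) : Prop :=
  0 < min num_block (module_list.length : Int)

instance (module_list : List String) (num_block : Int) : Decidable (Pre_get_partition_block module_list num_block) := by unfold Pre_get_partition_block; infer_instance

def pvWitness_get_partition_block : List String × Int := (["a", "b", "c"], 2)

def Spec_get_partition_block (module_list : List String) (num_block : Int) (out : List (String × List (String × Bool))) : Prop := out = get_partition_block_alt module_list num_block
instance (module_list : List String) (num_block : Int) (out : List (String × List (String × Bool))) : Decidable (Spec_get_partition_block module_list num_block out) := by unfold Spec_get_partition_block; infer_instance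

-- ===== CLAIM (what is proved, stated in full; the proofs are below) =====
def Claim_equal_get_partition_block : Prop := ∀ (module_list : List String) (num_block : Int), Dom_get_partition_block module_list num_block → Pre_get_partition_block module_list num_block → Spec_get_partition_block module_list num_block (get_partition_block module_list num_block)

-- ===== LEMMAS AND PROOFS =====

def pvSt (k rem i : Int) : Int := i * k + min i rem
def pvSz (k rem i : Int) : Int := k + (if i < rem then 1 else 0)

theorem pv_st_step (k rem i : Int) :
    pvSt k rem (i + 1) = pvSt k rem i + pvSz k rem i := by
  unfold pvSt pvSz
  have h : (i + 1) * k = i * k + k := by ring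
  rw [h]; split_ifs <;> omega

theorem pv_st_mono (k rem a b : Int) (hk : 1 ≤ k) (hab : a ≤ b) :
    pvSt k rem a ≤ pvSt k rem b := by
  unfold pvSt
  have h : a * k ≤ b * k := mul_le_mul_of_nonneg_right hab (by omega)
  omega

-- lookup into the closed-form block-size list
theorem pv_sizes_get (f : Int → Int) : ∀ (c : Nat) (a b i : Int), (b - a).toNat = c →
    0 ≤ i → i < b - a →
    PySem.List.pyGet? ((PySem.List.pyRange a b 1).map f) i = some (f (a + i)) := by
  intro c
  induction c with
  | zero => intro a b i h h0 hi; omega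
  | succ m ih =>
      intro a b i h h0 hi
      rw [PySem.List.pyRange_one_cons (by omega), List.map_cons]
      by_cases hz : i = 0
      · subst hz
        rw [PySem.List.pyGet?_zero_cons]
        norm_num
      · have hc : i = (((i - 1).toNat : Nat) : Int) + 1 := by omega
        rw [hc, PySem.List.pyGet?_cons_succ]
        rw [ih (a + 1) b ((i - 1).toNat : Int) (by omega) (by omega) (by omega)]
        have he : a + 1 + (((i - 1).toNat : Nat) : Int) = a + (((i - 1).toNat : Nat) : Int) + 1 := by ring
        congr 2
        omega

-- walking one block's worth of modules from within-block position j
theorem pv_walk_chunk (n k rem m szm : Int) (sizes : List Int)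
    (hget : PySem.List.pyGet? sizes m = some szm) :
    ∀ (c : List String) (j : Int) (d : PySem.Dict String (List (String × Bool))),
    0 ≤ j → j + (c.length : Int) ≤ szm →
    c.foldl (pvStepB n sizes) (m, j, d)
    = (m, j + (c.length : Int),
       (PySem.List.enumerate c j).foldl
         (fun d jm => d.insert jm.2
           [("first_block_flag", m == 0), ("last_block_flag", m == n - 1),
            ("first_module_flag", jm.1 == 0), ("last_module_flag", jm.1 == szm - 1)]) d) := by
  intro c
  induction c with
  | nil => intro j d _ _; simp [PySem.List.enumerate_nil]
  | cons x xs ih =>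
      intro j d hj0 hlen
      have hxl : (((x :: xs).length : Nat) : Int) = (xs.length : Int) + 1 := by
        simp [List.length_cons]
      have hjlt : j < szm := by
        have h0 : (0:Int) ≤ (xs.length : Int) := by positivity
        omega
      have hne : (j == szm) = false := by
        rw [beq_eq_false_iff_ne]; omega
      simp only [List.foldl_cons, PySem.List.enumerate_cons]
      have hstep : pvStepB n sizes (m, j, d) x
          = (m, j + 1,
             d.insert x [("first_block_flag", m == 0), ("last_block_flag", m == n - 1),
                         ("first_module_flag", j == 0), ("last_module_flag", j == szm - 1)]) := by
        unfold pvStepB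
        simp [hget, hne]
      rw [hstep, ih (j + 1) _ (by omega) (by omega)]
      congr 2
      omega

-- crossing a block boundary: starting saturated at block m equals starting fresh at block m+1
theorem pv_walk_boundary (n : Int) (sizes : List Int) (m szm sz' : Int)
    (hget : PySem.List.pyGet? sizes m = some szm)
    (hget' : PySem.List.pyGet? sizes (m + 1) = some sz') (hsz' : sz' ≠ 0) :
    ∀ (xs : List String) (d : PySem.Dict String (List (String × Bool))),
    (xs.foldl (pvStepB n sizes) (m, szm, d)).2.2
    = (xs.foldl (pvStepB n sizes) (m + 1, 0, d)).2.2 := by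
  intro xs d
  cases xs with
  | nil => rfl
  | cons x xs =>
      simp only [List.foldl_cons]
      have hz : ((0 : Int) == sz') = false := by
        rw [beq_eq_false_iff_ne]; omega
      have hstep : pvStepB n sizes (m, szm, d) x = pvStepB n sizes (m + 1, 0, d) x := by
        unfold pvStepB
        simp [hget, hget', hz]
      rw [hstep]

-- A's block-by-block fold equals B's single walk, from block m to the end
theorem pv_blocks_walk (lst : List String) (n k rem : Int) (sizes : List Int)
    (hn : 0 < n) (hk : 1 ≤ k) (hr0 : 0 ≤ rem) (hrn : rem < n)
    (hL : n * k + rem = (lst.length : Int))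
    (hsz : ∀ i : Int, 0 ≤ i → i < n → PySem.List.pyGet? sizes i = some (pvSz k rem i)) :
    ∀ (c m : Nat) (d : PySem.Dict String (List (String × Bool))), (m : Int) + (c : Int) = n →
    (PySem.List.pyRange (m : Int) n 1).foldl
      (fun d i =>
        (PySem.List.enumerate ((lst.drop (pvSt k rem i).toNat).take (pvSz k rem i).toNat) 0).foldl
          (fun d jm => d.insert jm.2
            [("first_block_flag", i == 0), ("last_block_flag", i == n - 1),
             ("first_module_flag", jm.1 == 0), ("last_module_flag", jm.1 == pvSz k rem i - 1)]) d) d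
    = ((lst.drop (pvSt k rem (m : Int)).toNat).foldl (pvStepB n sizes) (((m : Int)), 0, d)).2.2 := by
  have hstn : pvSt k rem n = (lst.length : Int) := by
    unfold pvSt; have h : min n rem = rem := by omega
    omega
  intro c
  induction c with
  | zero =>
      intro m d hm
      have hmn : (m : Int) = n := by omega
      rw [hmn, PySem.List.pyRange_one_eq_nil (by omega), hstn]
      rw [List.drop_eq_nil_of_le (by omega)]
      rfl
  | succ c ih =>
      intro m d hm
      have hmi : (m : Int) < n := by omega
      have hmnn : 0 ≤ (m : Int) := by positivity
      have hst0 : 0 ≤ pvSt k rem m := by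
        unfold pvSt; have := mul_nonneg hmnn (by omega : (0:Int) ≤ k); omega
      have hsz0 : 0 < pvSz k rem m := by unfold pvSz; split_ifs <;> omega
      have hstep : pvSt k rem ((m : Int) + 1) = pvSt k rem m + pvSz k rem m := pv_st_step k rem m
      have hle : pvSt k rem ((m : Int) + 1) ≤ (lst.length : Int) := by
        rw [← hstn]; exact pv_st_mono k rem _ n hk (by omega)
      have hsplit : lst.drop (pvSt k rem m).toNat
          = (lst.drop (pvSt k rem m).toNat).take (pvSz k rem m).toNat
            ++ lst.drop (pvSt k rem ((m : Int) + 1)).toNat := by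
        conv_lhs => rw [← List.take_append_drop (pvSz k rem m).toNat (lst.drop (pvSt k rem m).toNat)]
        rw [List.drop_drop]
        have h9 : (pvSt k rem (m : Int)).toNat + (pvSz k rem (m : Int)).toNat
            = (pvSt k rem ((m : Int) + 1)).toNat := by omega
        rw [h9]
      have hlen : (((lst.drop (pvSt k rem m).toNat).take (pvSz k rem m).toNat).length : Int)
          = pvSz k rem m := by
        simp [List.length_take, List.length_drop]
        omega
      rw [PySem.List.pyRange_one_cons hmi]
      simp only [List.foldl_cons]
      conv_rhs => rw [hsplit]
      rw [List.foldl_append]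
      rw [pv_walk_chunk n k rem (m : Int) (pvSz k rem m) sizes (hsz m hmnn hmi) _ 0 d
            (le_refl 0) (by rw [hlen]; omega)]
      rw [hlen, zero_add]
      set dm := (PySem.List.enumerate ((lst.drop (pvSt k rem (m : Int)).toNat).take (pvSz k rem (m : Int)).toNat) 0).foldl
          (fun d jm => d.insert jm.2
            [("first_block_flag", (m : Int) == 0), ("last_block_flag", (m : Int) == n - 1),
             ("first_module_flag", jm.1 == 0), ("last_module_flag", jm.1 == pvSz k rem (m : Int) - 1)]) d with hdm
      by_cases hm1 : (m : Int) + 1 = n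
      · rw [PySem.List.pyRange_one_eq_nil (by omega)]
        simp only [List.foldl_nil]
        rw [show pvSt k rem ((m : Int) + 1) = (lst.length : Int) by rw [hm1, hstn]]
        rw [List.drop_eq_nil_of_le (by omega)]
        rfl
      · have hsz1 : 0 < pvSz k rem ((m : Int) + 1) := by unfold pvSz; split_ifs <;> omega
        rw [pv_walk_boundary n sizes (m : Int) (pvSz k rem (m : Int)) (pvSz k rem ((m : Int) + 1))
              (hsz m hmnn hmi) (hsz ((m : Int) + 1) (by omega) (by omega)) (by omega)]
        have hcast : ((m + 1 : Nat) : Int) = (m : Int) + 1 := by push_cast; ring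
        rw [show ((m : Int) + 1) = ((m + 1 : Nat) : Int) from hcast.symm]
        rw [← ih (m + 1) dm (by push_cast; omega)]

theorem pv_enum_map {α β : Type} (xs : List α) (f : α → β) :
    ∀ s : Int, PySem.List.enumerate (xs.map f) s
      = (PySem.List.enumerate xs s).map (fun p => (p.1, f p.2)) := by
  induction xs with
  | nil => intro s; simp [PySem.List.enumerate_nil]
  | cons x xs ih => intro s; simp [PySem.List.enumerate_cons, ih]

theorem pv_enum_pyRange : ∀ (c : Nat) (a b : Int), (b - a).toNat = c →
    PySem.List.enumerate (PySem.List.pyRange a b 1) a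
    = (PySem.List.pyRange a b 1).map (fun i => (i, i)) := by
  intro c
  induction c with
  | zero => intro a b h
            rw [PySem.List.pyRange_one_eq_nil (by omega)]
            simp [PySem.List.enumerate_nil]
  | succ m ih => intro a b h
                 rw [PySem.List.pyRange_one_cons (by omega)]
                 simp only [PySem.List.enumerate_cons, List.map_cons]
                 rw [ih (a+1) b (by omega)]

theorem pv_split_fold (lst : List String) (k rem : Int) (hr : 0 ≤ rem) :
    ∀ (m : Nat),
    ((PySem.List.pyRange 0 (m : Int) 1).foldl
      (fun (st : List (List String) × Int) i =>
        (st.1 ++ [PySem.List.slice lst (some st.2) (some (st.2 + k + if i < rem then 1 else 0))],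
         st.2 + k + if i < rem then 1 else 0))
      ([], 0))
    = ((PySem.List.pyRange 0 (m : Int) 1).map
        (fun i => PySem.List.slice lst (some (pvSt k rem i)) (some (pvSt k rem i + pvSz k rem i))),
       pvSt k rem m) := by
  intro m
  induction m with
  | zero =>
      rw [show ((0 : Nat) : Int) = 0 from rfl, PySem.List.pyRange_one_eq_nil (by omega)]
      simp only [List.foldl_nil, List.map_nil]
      unfold pvSt; congr 1; omega
  | succ m ih =>
      have hcast : ((m + 1 : Nat) : Int) = (m : Int) + 1 := by push_cast; ring
      rw [hcast, PySem.List.pyRange_one_succ_right (by positivity), List.foldl_append, List.map_append, ih]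
      simp only [List.foldl_cons, List.foldl_nil, List.map_cons, List.map_nil]
      rw [pv_st_step]
      simp only [pvSz, ← add_assoc]


-- ===== VERDICT (by name: the statement is the Claim_ definition above) =====
theorem get_partition_block_spec : Claim_equal_get_partition_block := by
  unfold Claim_equal_get_partition_block
  intro ml nb hdom hpre
  unfold Spec_get_partition_block
  unfold Pre_get_partition_block at hpre
  simp only [get_partition_block, get_partition_block_alt, uniformly_split]
  have hne : min nb (ml.length : Int) ≠ 0 := by omega
  have hdm : PySem.Int.divmod? (ml.length : Int) (min nb (ml.length : Int))
      = some (PySem.Int.floordiv (ml.length : Int) (min nb (ml.length : Int)),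
              PySem.Int.mod (ml.length : Int) (min nb (ml.length : Int))) := by
    simp [PySem.Int.divmod?, hne, PySem.Int.floordiv, PySem.Int.mod]
  rw [hdm]
  set n := min nb (ml.length : Int) with hn
  set k := PySem.Int.floordiv (ml.length : Int) n with hkdef
  set rem := PySem.Int.mod (ml.length : Int) n with hremdef
  simp only []
  have hpos : 0 < n := hpre
  have hnL : n ≤ (ml.length : Int) := min_le_right _ _
  have hk1 : 1 ≤ k := by rw [hkdef, PySem.Int.le_floordiv_iff_mul_le hpos]; omega
  have hr0 : 0 ≤ rem := PySem.Int.mod_nonneg _ hpos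
  have hrn : rem < n := PySem.Int.mod_lt _ hpos
  have hL : n * k + rem = (ml.length : Int) := by
    have h := PySem.Int.floordiv_mul_add_mod (ml.length : Int) n
    rw [← hkdef, ← hremdef] at h
    have hc : n * k = k * n := mul_comm _ _
    omega
  have hnn : ((n.toNat : Nat) : Int) = n := Int.toNat_of_nonneg hpos.le
  have hsf := pv_split_fold ml k rem hr0 n.toNat
  rw [hnn] at hsf
  rw [hsf]
  simp only []
  rw [pv_enum_map, pv_enum_pyRange ((n - 0).toNat) 0 n rfl, List.map_map]
  rw [List.foldl_map]
  simp only [Function.comp_def]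
  have hcongr : ∀ (d : PySem.Dict String (List (String × Bool))),
      ∀ i ∈ PySem.List.pyRange 0 n 1,
      (PySem.List.enumerate
          (PySem.List.slice ml (some (pvSt k rem i)) (some (pvSt k rem i + pvSz k rem i)))).foldl
        (fun d jm => d.insert jm.2
          [("first_block_flag", i == 0), ("last_block_flag", i == n - 1),
           ("first_module_flag", jm.1 == 0),
           ("last_module_flag", jm.1 ==
             ((PySem.List.slice ml (some (pvSt k rem i)) (some (pvSt k rem i + pvSz k rem i))).length : Int) - 1)]) d
      = (PySem.List.enumerate ((ml.drop (pvSt k rem i).toNat).take (pvSz k rem i).toNat)).foldl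
        (fun d jm => d.insert jm.2
          [("first_block_flag", i == 0), ("last_block_flag", i == n - 1),
           ("first_module_flag", jm.1 == 0),
           ("last_module_flag", jm.1 == pvSz k rem i - 1)]) d := by
    intro d i hi
    obtain ⟨hi0, hin⟩ := (PySem.List.mem_pyRange_one).1 hi
    have hstnn : 0 ≤ pvSt k rem i := by
      unfold pvSt
      have := mul_nonneg hi0 (by omega : (0:Int) ≤ k)
      omega
    have hsz0 : 0 < pvSz k rem i := by unfold pvSz; split_ifs <;> omega
    have hle2 : pvSt k rem i + pvSz k rem i ≤ (ml.length : Int) := by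
      have h1 := pv_st_step k rem i
      have h2 := pv_st_mono k rem (i+1) n hk1 (by omega)
      have hstn : pvSt k rem n = (ml.length : Int) := by
        unfold pvSt
        have hmin : min n rem = rem := by omega
        omega
      omega
    have hslice : PySem.List.slice ml (some (pvSt k rem i)) (some (pvSt k rem i + pvSz k rem i))
        = (ml.drop (pvSt k rem i).toNat).take (pvSz k rem i).toNat := by
      rw [PySem.List.slice_toNat ml hstnn (by omega)]
      congr 1
      omega
    rw [hslice]
    have hlen : (((ml.drop (pvSt k rem i).toNat).take (pvSz k rem i).toNat).length : Int)
        = pvSz k rem i := by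
      simp [List.length_take, List.length_drop]
      omega
    rw [hlen]
  rw [PySem.List.foldl_congr_mem (PySem.List.pyRange 0 n 1) _ _ PySem.Dict.empty hcongr]
  have hszget : ∀ i : Int, 0 ≤ i → i < n →
      PySem.List.pyGet? ((PySem.List.pyRange 0 n 1).map (fun i => k + if i < rem then 1 else 0)) i
      = some (pvSz k rem i) := by
    intro i hi0 hin
    have h := pv_sizes_get (fun i => k + if i < rem then 1 else 0) (n - 0).toNat 0 n i rfl hi0 (by omega)
    rw [h]
    simp only [zero_add]
    rfl
  have hb := pv_blocks_walk ml n k rem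
      ((PySem.List.pyRange 0 n 1).map (fun i => k + if i < rem then 1 else 0))
      hpos hk1 hr0 hrn hL hszget n.toNat 0 PySem.Dict.empty (by push_cast; omega)
  have hst0 : pvSt k rem 0 = 0 := by
    unfold pvSt
    have hmin : min 0 rem = 0 := by omega
    simp [hmin]
  simp only [Nat.cast_zero, hst0, Int.toNat_zero, List.drop_zero] at hb
  rw [hb]
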